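-- pv_equiv track=rewrite | github.com/frostburn/divine_move | go_board.py | chains
-- ===== SOURCE A (Python) =====
-- def flood(source, target, v_shift):
--     source &= target
--     if not source:
--         return 0
--     while True:
--         temp = source
--         source |= (
--             (source >> 1) |
--             (source << 1) |
--             (source >> v_shift) |
--             (source << v_shift)
--         ) & target
--         if temp == source:
--             break
--     return source
--
-- def chains(b, v_shift):
--     result = []
--     y = 0
--     while b:
--         for x in range(0, v_shift - 1, 2):
--             chain = flood(3 << (x + y * v_shift), b, v_shift)
--             if chain:
--                 result.append(chain)
--                 b ^= chain
--         y += 1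
--     return result
-- ===== SOURCE B (Python) =====
-- def component(p, board, v_shift):
--     """Collect the connected chain (bitboard) containing seed positions p / p+1
--     by an explicit-stack DFS over bit positions (neighbours differ by 1 or v_shift)."""
--     stack = [p, p + 1]
--     chain = 0
--     while stack:
--         q = stack.pop()
--         if q >= 0 and (board >> q) & 1 and not (chain >> q) & 1:
--             chain |= 1 << q
--             stack += [q - 1, q + 1, q - v_shift, q + v_shift]
--     return chain
--
--
-- def chains(b, v_shift):
--     result = []
--     s = 0
--     while b:
--         r = s % v_shift
--         if r % 2 == 0 and r != v_shift - 1: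
--             chain = component(s, b, v_shift)
--             if chain:
--                 result.append(chain)
--                 b ^= chain
--         s += 1
--     return result
-- ===== Notes on version B (the rewrite author's own statement) =====
-- stated objective: faster
-- what changed: B replaces A's whole-board bitwise flood-fill fixpoint (repeated shift-or passes per seed) and nested row/column seed loops by a single running seed-index scan with an explicit-stack depth-first search over bit positions; the scan stops as soon as the board empties and each stone is visited once, instead of A flooding the whole board once per seed position of every row.
import Mathlib
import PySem

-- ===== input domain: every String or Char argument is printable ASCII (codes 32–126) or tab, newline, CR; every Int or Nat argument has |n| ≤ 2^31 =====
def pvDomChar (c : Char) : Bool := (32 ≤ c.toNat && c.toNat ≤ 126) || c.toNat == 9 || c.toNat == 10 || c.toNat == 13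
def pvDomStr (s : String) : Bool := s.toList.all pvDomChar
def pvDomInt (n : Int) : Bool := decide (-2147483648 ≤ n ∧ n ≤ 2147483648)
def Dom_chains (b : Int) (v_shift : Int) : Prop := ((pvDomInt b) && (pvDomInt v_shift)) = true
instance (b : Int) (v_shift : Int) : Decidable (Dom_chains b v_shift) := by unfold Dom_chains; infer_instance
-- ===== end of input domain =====

-- B replaces A's whole-board bitwise flood-fill fixpoint and nested row/column seed
-- loops by a single seed-index scan with an explicit-stack DFS over bit positions
-- (objective: alternative; same return values, proved below).

-- ===== PORT A =====
-- Python `while True` loop of flood; the fuel only bounds the iterations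
-- (each pass strictly grows `source` inside `target`, so for target ≥ 0 the
-- fixpoint is always reached within `target.natAbs + 2` passes).
def floodLoop (fuel : Nat) (source target : Int) (k : Nat) : Int :=
  match fuel with
  | 0 => source
  | f + 1 =>
    let s' := PySem.Int.bor source (PySem.Int.band
      (PySem.Int.bor (PySem.Int.bor (PySem.Int.bor (source >>> 1) (source <<< 1)) (source >>> k))
        (source <<< k)) target)
    if s' = source then s' else floodLoop f s' target k

-- `v_shift.toNat`: Python raises on a negative shift count; such inputs are outside Pre_.
def flood (source target v_shift : Int) : Int :=
  let s := PySem.Int.band source target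
  if s = 0 then 0 else floodLoop (target.natAbs + 2) s target v_shift.toNat

-- the `for x in range(0, v_shift - 1, 2)` body, threading (b, result)
def chainsRow (xs : List Int) (y v b : Int) (res : List Int) : Int × List Int :=
  match xs with
  | [] => (b, res)
  | x :: rest =>
    let chain := flood ((3 : Int) <<< (x + y * v).toNat) b v
    if chain ≠ 0 then chainsRow rest y v (PySem.Int.bxor b chain) (res ++ [chain])
    else chainsRow rest y v b res

-- Python `while b` loop; the fuel `b.natAbs + 2` bounds the rows actually used
-- on every input on which the Python returns.
def chainsLoop (fuel : Nat) (b v y : Int) (res : List Int) : List Int :=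
  match fuel with
  | 0 => res
  | f + 1 =>
    if b = 0 then res
    else
      let st := chainsRow (PySem.List.pyRange 0 (v - 1) 2) y v b res
      chainsLoop f st.1 v (y + 1) st.2

def chains (b : Int) (v_shift : Int) : List Int :=
  chainsLoop (b.natAbs + 2) b v_shift 0 []

-- ===== PORT B =====
-- Python `while stack` of component (list head here = Python list end, the
-- push/pop side); the fuel bounds the iterations: each pop either discards its
-- element or marks a new bit of `board`, so `5 * board.natAbs + 8` suffices
-- for board ≥ 0.
def dfsLoop (fuel : Nat) (stack : List Int) (board chain v : Int) : Int :=
  match fuel, stack with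
  | 0, _ => chain
  | _ + 1, [] => chain
  | f + 1, q :: rest =>
    if 0 ≤ q ∧ PySem.Int.band (board >>> q.toNat) 1 = 1 ∧
        ¬ PySem.Int.band (chain >>> q.toNat) 1 = 1 then
      dfsLoop f ((q + v) :: (q - v) :: (q + 1) :: (q - 1) :: rest) board
        (PySem.Int.bor chain ((1 : Int) <<< q.toNat)) v
    else dfsLoop f rest board chain v

def component (p board v_shift : Int) : Int :=
  dfsLoop (5 * board.natAbs + 8) [p + 1, p] board 0 v_shift

-- Python `while b` with the running seed index s; the fuel bounds the steps
-- used on every input on which the Python returns.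
def altLoop (fuel : Nat) (s b v : Int) (res : List Int) : List Int :=
  match fuel with
  | 0 => res
  | f + 1 =>
    if b = 0 then res
    else
      let r := PySem.Int.mod s v
      if PySem.Int.mod r 2 = 0 ∧ ¬ r = v - 1 then
        let chain := component s b v
        if chain ≠ 0 then altLoop f (s + 1) (PySem.Int.bxor b chain) v (res ++ [chain])
        else altLoop f (s + 1) b v res
      else altLoop f (s + 1) b v res

def chains_alt (b : Int) (v_shift : Int) : List Int :=
  altLoop (v_shift.toNat * (b.natAbs + 2)) 0 b v_shift []

-- ===== PRECONDITION & SPEC =====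
-- upward scan of the maximal vertical run (step k) above bit p: true iff no
-- stone of that run has a set horizontal neighbour
def isoRunUpB (n k p : Nat) : Bool :=
  (List.range 33).all fun i =>
    !((List.range (i + 1)).all fun j => n.testBit (p + j * k)) ||
      (!n.testBit (p + i * k - 1) && !n.testBit (p + i * k + 1))

-- some horizontally isolated vertical run of stones lies entirely in column k-1
def divergentColB (n k : Nat) : Bool :=
  (List.range 33).any fun p =>
    n.testBit p && decide (p % k = k - 1) && (decide (p < k) || !n.testBit (p - k)) &&
      isoRunUpB n k p

-- Pre_ excludes exactly the inputs on which the Python A never returns (it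
-- loops forever): negative boards, v_shift ≤ 1 with b ≠ 0, and odd v_shift
-- when some horizontally isolated vertical run of stones lies entirely in the
-- rightmost column (no seed of the scan ever reaches it, so b never becomes 0).
def Pre_chains (b : Int) (v_shift : Int) : Prop :=
  0 ≤ b ∧ (b = 0 ∨ (2 ≤ v_shift ∧
    (v_shift.toNat % 2 = 0 ∨ divergentColB b.toNat v_shift.toNat = false)))
instance (b : Int) (v_shift : Int) : Decidable (Pre_chains b v_shift) := by
  unfold Pre_chains; infer_instance

def pvWitness_chains : Int × Int := (54, 3)

def Spec_chains (b : Int) (v_shift : Int) (out : List Int) : Prop := out = chains_alt b v_shift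
instance (b : Int) (v_shift : Int) (out : List Int) : Decidable (Spec_chains b v_shift out) := by
  unfold Spec_chains; infer_instance

-- ===== CLAIM (what is proved, stated in full; the proofs are below) =====
def Claim_equal_chains : Prop := ∀ (b : Int) (v_shift : Int), Dom_chains b v_shift → Pre_chains b v_shift → Spec_chains b v_shift (chains b v_shift)

-- ===== LEMMAS AND PROOFS =====

-- ---- Nat-level mirrors of the two inner engines ----
def spreadN (s k : Nat) : Nat := ((s >>> 1 ||| s <<< 1) ||| s >>> k) ||| s <<< k
def floodStepN (s t k : Nat) : Nat := s ||| (spreadN s k &&& t)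

def floodLoopN (fuel : Nat) (s t k : Nat) : Nat :=
  match fuel with
  | 0 => s
  | f + 1 =>
    let s' := floodStepN s t k
    if s' = s then s' else floodLoopN f s' t k

def floodN (source t k : Nat) : Nat :=
  let s := source &&& t
  if s = 0 then 0 else floodLoopN (t + 2) s t k

def dfsLoopN (fuel : Nat) (stack : List Int) (t c : Nat) (v : Int) : Nat :=
  match fuel, stack with
  | 0, _ => c
  | _ + 1, [] => c
  | f + 1, q :: rest =>
    if 0 ≤ q ∧ (t >>> q.toNat) &&& 1 = 1 ∧ ¬ (c >>> q.toNat) &&& 1 = 1 then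
      dfsLoopN f ((q + v) :: (q - v) :: (q + 1) :: (q - 1) :: rest) t (c ||| 1 <<< q.toNat) v
    else dfsLoopN f rest t c v

def componentN (p : Int) (t : Nat) (v : Int) : Nat :=
  dfsLoopN (5 * t + 8) [p + 1, p] t 0 v

-- ---- bridges: the Int ports equal the Nat mirrors on nonnegative boards ----
theorem step_cast (s t k : Nat) :
    PySem.Int.bor (s : Int) (PySem.Int.band
      (PySem.Int.bor (PySem.Int.bor (PySem.Int.bor ((s : Int) >>> 1) ((s : Int) <<< 1)) ((s : Int) >>> k))
        ((s : Int) <<< k)) (t : Int)) = ((floodStepN s t k : Nat) : Int) := by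
  have e1 : ((s : Int) >>> 1) = ((s >>> 1 : Nat) : Int) := by exact_mod_cast rfl
  have e2 : ((s : Int) <<< 1) = ((s <<< 1 : Nat) : Int) := by exact_mod_cast rfl
  have e3 : ((s : Int) >>> k) = ((s >>> k : Nat) : Int) := by exact_mod_cast rfl
  have e4 : ((s : Int) <<< k) = ((s <<< k : Nat) : Int) := by exact_mod_cast rfl
  rw [e1, e2, e3, e4, PySem.Int.bor_natCast, PySem.Int.bor_natCast, PySem.Int.bor_natCast,
    PySem.Int.band_natCast, PySem.Int.bor_natCast]
  rfl

theorem floodLoop_cast (fuel : Nat) : ∀ (s t k : Nat),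
    floodLoop fuel (s : Int) (t : Int) k = ((floodLoopN fuel s t k : Nat) : Int) := by
  induction fuel with
  | zero => intro s t k; rfl
  | succ f ih =>
    intro s t k
    show (if PySem.Int.bor (s : Int) _ = (s : Int) then _ else _) = _
    rw [step_cast]
    simp only [floodLoopN, Nat.cast_inj]
    split <;> simp_all

theorem flood_cast (s t : Nat) (v : Int) :
    flood (s : Int) (t : Int) v = ((floodN s t v.toNat : Nat) : Int) := by
  simp only [flood, floodN, PySem.Int.band_natCast, Int.natAbs_natCast, Nat.cast_eq_zero]
  split <;> simp [floodLoop_cast]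

theorem dfs_cond_cast (t n : Nat) :
    (PySem.Int.band ((t : Int) >>> n) 1 = 1) ↔ ((t >>> n) &&& 1 = 1) := by
  have e : ((t : Int) >>> n) = ((t >>> n : Nat) : Int) := by exact_mod_cast rfl
  rw [e, show (1 : Int) = ((1 : Nat) : Int) from rfl, PySem.Int.band_natCast]
  exact_mod_cast Iff.rfl

theorem dfs_push_cast (c n : Nat) :
    PySem.Int.bor (c : Int) ((1 : Int) <<< n) = ((c ||| 1 <<< n : Nat) : Int) := by
  have e : ((1 : Int) <<< n) = ((1 <<< n : Nat) : Int) := by exact_mod_cast rfl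
  rw [e, PySem.Int.bor_natCast]

theorem dfsLoop_cast (fuel : Nat) : ∀ (stack : List Int) (t c : Nat) (v : Int),
    dfsLoop fuel stack (t : Int) (c : Int) v = ((dfsLoopN fuel stack t c v : Nat) : Int) := by
  induction fuel with
  | zero => intro stack t c v; rfl
  | succ f ih =>
    intro stack t c v
    match stack with
    | [] => rfl
    | q :: rest =>
      show (if 0 ≤ q ∧ _ ∧ ¬ _ then _ else _) = _
      simp only [dfs_cond_cast, dfs_push_cast]
      simp only [dfsLoopN]
      split <;> simp_all

theorem component_cast (p : Int) (t : Nat) (v : Int) :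
    component p (t : Int) v = ((componentN p t v : Nat) : Int) := by
  show dfsLoop (5 * (t : Int).natAbs + 8) [p + 1, p] (t : Int) ((0 : Nat) : Int) v = _
  rw [Int.natAbs_natCast, dfsLoop_cast]
  rfl

-- ---- connectivity theory ----
def adjP (k p q : Nat) : Prop := p + 1 = q ∨ q + 1 = p ∨ p + k = q ∨ q + k = p
def stpP (t k p q : Nat) : Prop := t.testBit q = true ∧ adjP k p q
def GoodP (sN t k q : Nat) : Prop :=
  ∃ p, (p = sN ∨ p = sN + 1) ∧ t.testBit p = true ∧ Relation.ReflTransGen (stpP t k) p q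

theorem testBit_spreadN {s k q : Nat} :
    (spreadN s k).testBit q = true ↔ ∃ p, s.testBit p = true ∧ adjP k p q := by
  simp only [spreadN, Nat.testBit_lor, Nat.testBit_shiftRight, Nat.testBit_shiftLeft,
    Bool.or_eq_true, Bool.and_eq_true, decide_eq_true_eq]
  constructor
  · rintro (((h | h) | h) | h)
    · exact ⟨q + 1, by simpa [Nat.add_comm] using h, Or.inr (Or.inl rfl)⟩
    · exact ⟨q - 1, h.2, Or.inl (by omega)⟩
    · exact ⟨k + q, by simpa using h, Or.inr (Or.inr (Or.inr (by omega)))⟩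
    · exact ⟨q - k, h.2, Or.inr (Or.inr (Or.inl (by omega)))⟩
  · rintro ⟨p, hp, (h | h | h | h)⟩
    · refine Or.inl (Or.inl (Or.inr ⟨by omega, ?_⟩))
      have hq : q - 1 = p := by omega
      rw [hq]; exact hp
    · refine Or.inl (Or.inl (Or.inl ?_))
      have hq : 1 + q = p := by omega
      rw [hq]; exact hp
    · refine Or.inr ⟨by omega, ?_⟩
      have hq : q - k = p := by omega
      rw [hq]; exact hp
    · refine Or.inl (Or.inr ?_)
      have hq : k + q = p := by omega
      rw [hq]; exact hp

theorem floodLoopN_correct (t k sN : Nat) : ∀ (fuel s : Nat),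
    (∀ q, s.testBit q = true → t.testBit q = true) →
    (∀ q, s.testBit q = true → GoodP sN t k q) →
    (∀ p, (p = sN ∨ p = sN + 1) → t.testBit p = true → s.testBit p = true) →
    t - s < fuel →
    ∀ q, (floodLoopN fuel s t k).testBit q = true ↔ GoodP sN t k q := by
  intro fuel
  induction fuel with
  | zero => intro s _ _ _ h; omega
  | succ f ih =>
    intro s hsub hsound hcov hfuel q
    simp only [floodLoopN]
    by_cases hfix : floodStepN s t k = s
    · simp only [hfix, if_pos rfl]
      constructor
      · exact hsound q
      · rintro ⟨p, hseed, hp, hr⟩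
        induction hr with
        | refl => exact hcov p hseed hp
        | @tail m q' hpath hstep ihr =>
          have hmem : s.testBit m = true := ihr
          have hstepbit : (floodStepN s t k).testBit q' = true := by
            simp only [floodStepN, Nat.testBit_lor, Nat.testBit_land, Bool.or_eq_true,
              Bool.and_eq_true]
            exact Or.inr ⟨testBit_spreadN.2 ⟨m, hmem, hstep.2⟩, hstep.1⟩
          rwa [hfix] at hstepbit
    · rw [if_neg hfix]
      have hsub' : ∀ q, (floodStepN s t k).testBit q = true → t.testBit q = true := by
        intro q hq
        simp only [floodStepN, Nat.testBit_lor, Nat.testBit_land, Bool.or_eq_true,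
          Bool.and_eq_true] at hq
        rcases hq with h | h
        · exact hsub q h
        · exact h.2
      have hmono : ∀ q, s.testBit q = true → (floodStepN s t k).testBit q = true := by
        intro q hq; simp [floodStepN, Nat.testBit_lor, hq]
      have hsound' : ∀ q, (floodStepN s t k).testBit q = true → GoodP sN t k q := by
        intro q hq
        simp only [floodStepN, Nat.testBit_lor, Nat.testBit_land, Bool.or_eq_true,
          Bool.and_eq_true] at hq
        rcases hq with h | ⟨hsp, ht⟩
        · exact hsound q h
        · obtain ⟨p, hp, hadj⟩ := testBit_spreadN.1 hsp
          obtain ⟨p0, hseed, hp0, hr⟩ := hsound p hp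
          exact ⟨p0, hseed, hp0, hr.tail ⟨ht, hadj⟩⟩
      have hle : s ≤ floodStepN s t k := Nat.le_of_testBit hmono
      have hle2 : floodStepN s t k ≤ t := Nat.le_of_testBit hsub'
      have hlt : s < floodStepN s t k := lt_of_le_of_ne hle (fun h => hfix h.symm)
      exact ih (floodStepN s t k) hsub' hsound' (fun p hs hp => hmono p (hcov p hs hp))
        (by omega) q

theorem testBit_three_shift (sN p : Nat) :
    ((3 : Nat) <<< sN).testBit p = true ↔ p = sN ∨ p = sN + 1 := by
  have h3 : (3 : Nat) = 2 ^ 2 - 1 := by norm_num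
  simp only [Nat.testBit_shiftLeft, Bool.and_eq_true, decide_eq_true_eq, h3,
    Nat.testBit_two_pow_sub_one]
  omega

theorem floodN_correct (sN t k : Nat) :
    ∀ q, (floodN (3 <<< sN) t k).testBit q = true ↔ GoodP sN t k q := by
  intro q
  simp only [floodN]
  by_cases h0 : (3 : Nat) <<< sN &&& t = 0
  · rw [if_pos h0]
    simp only [Nat.zero_testBit]
    constructor
    · intro h; exact absurd h (by simp)
    · rintro ⟨p, hseed, hp, _⟩
      exfalso
      have hbit : ((3 : Nat) <<< sN &&& t).testBit p = true := by
        simp [Nat.testBit_land, (testBit_three_shift sN p).2 hseed, hp]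
      rw [h0] at hbit
      simp at hbit
  · rw [if_neg h0]
    refine floodLoopN_correct t k sN (t + 2) _ ?_ ?_ ?_ ?_ q
    · intro q hq; simp only [Nat.testBit_land, Bool.and_eq_true] at hq; exact hq.2
    · intro q hq
      simp only [Nat.testBit_land, Bool.and_eq_true] at hq
      exact ⟨q, (testBit_three_shift sN q).1 hq.1, hq.2, Relation.ReflTransGen.refl⟩
    · intro p hseed hp
      simp [Nat.testBit_land, (testBit_three_shift sN p).2 hseed, hp]
    · have hs0 : (3 : Nat) <<< sN &&& t ≤ t :=
        Nat.le_of_testBit (by intro i hi; simp only [Nat.testBit_land, Bool.and_eq_true] at hi; exact hi.2)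
      omega

theorem and_one_testBit (n i : Nat) : ((n >>> i) &&& 1 = 1) ↔ n.testBit i = true := by
  rw [Nat.and_one_is_mod, Nat.testBit, Nat.and_comm, Nat.and_one_is_mod]
  simp only [bne_iff_ne, ne_eq]
  omega

theorem testBit_one_shift (i p : Nat) : ((1 : Nat) <<< i).testBit p = true ↔ p = i := by
  rw [Nat.one_shiftLeft, Nat.testBit_two_pow]
  simp [eq_comm]

theorem dfsLoopN_correct (t k sN : Nat) : ∀ (fuel : Nat) (stack : List Int) (c : Nat),
    (∀ q, c.testBit q = true → t.testBit q = true) →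
    (∀ q, c.testBit q = true → GoodP sN t k q) →
    (∀ x ∈ stack, ∀ q : Nat, x = (q : Int) → t.testBit q = true → GoodP sN t k q) →
    (∀ a b, c.testBit a = true → stpP t k a b → c.testBit b = true ∨ ((b : Int) ∈ stack)) →
    (∀ p, (p = sN ∨ p = sN + 1) → t.testBit p = true → c.testBit p = true ∨ ((p : Int) ∈ stack)) →
    stack.length + 5 * (t - c) < fuel →
    ∀ q, (dfsLoopN fuel stack t c (k : Int)).testBit q = true ↔ GoodP sN t k q := by
  intro fuel
  induction fuel with
  | zero => intro stack c _ _ _ _ _ h; exact absurd h (Nat.not_lt_zero _)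
  | succ f ih =>
    intro stack c hsub hsound hstk hfront hseed hfuel q
    match stack with
    | [] =>
      rw [show dfsLoopN (f + 1) [] t c (k : Int) = c from rfl]
      constructor
      · exact hsound q
      · rintro ⟨p, hs, hp, hr⟩
        have hbase : c.testBit p = true := (hseed p hs hp).resolve_right (by simp)
        clear hs hp
        induction hr with
        | refl => exact hbase
        | @tail m q' hpath hstep ihr =>
          exact (hfront m q' ihr hstep).resolve_right (by simp)
    | x :: rest =>
      rw [show dfsLoopN (f + 1) (x :: rest) t c (k : Int) =
        (if 0 ≤ x ∧ (t >>> x.toNat) &&& 1 = 1 ∧ ¬ (c >>> x.toNat) &&& 1 = 1 then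
          dfsLoopN f ((x + (k : Int)) :: (x - (k : Int)) :: (x + 1) :: (x - 1) :: rest) t
            (c ||| 1 <<< x.toNat) (k : Int)
        else dfsLoopN f rest t c (k : Int)) from rfl]
      by_cases hC : 0 ≤ x ∧ (t >>> x.toNat) &&& 1 = 1 ∧ ¬ (c >>> x.toNat) &&& 1 = 1
      · rw [if_pos hC]
        obtain ⟨hq0, hA, hB⟩ := hC
        rw [and_one_testBit] at hA
        rw [and_one_testBit] at hB
        have hx : x = (x.toNat : Int) := (Int.toNat_of_nonneg hq0).symm
        have hGq : GoodP sN t k x.toNat := hstk x (List.mem_cons_self) x.toNat hx hA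
        have hcq : c.testBit x.toNat = false := by simpa using hB
        have hc'bit : ∀ j, (c ||| 1 <<< x.toNat).testBit j = true ↔
            (c.testBit j = true ∨ j = x.toNat) := by
          intro j; simp only [Nat.testBit_lor, Bool.or_eq_true, testBit_one_shift]
        have hc'sub : ∀ j, (c ||| 1 <<< x.toNat).testBit j = true → t.testBit j = true := by
          intro j hj
          rcases (hc'bit j).1 hj with h | rfl
          · exact hsub j h
          · exact hA
        apply ih
        · exact hc'sub
        · intro j hj
          rcases (hc'bit j).1 hj with h | rfl
          · exact hsound j h
          · exact hGq
        · intro z hz b hzb hb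
          obtain ⟨p0, hs0, hp0, hr0⟩ := hGq
          simp only [List.mem_cons] at hz
          rcases hz with rfl | rfl | rfl | rfl | hm
          · have hbv : b = x.toNat + k := by omega
            exact ⟨p0, hs0, hp0, hr0.tail ⟨hb, Or.inr (Or.inr (Or.inl hbv.symm))⟩⟩
          · have hbv : b + k = x.toNat := by omega
            exact ⟨p0, hs0, hp0, hr0.tail ⟨hb, Or.inr (Or.inr (Or.inr hbv))⟩⟩
          · have hbv : b = x.toNat + 1 := by omega
            exact ⟨p0, hs0, hp0, hr0.tail ⟨hb, Or.inl hbv.symm⟩⟩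
          · have hbv : b + 1 = x.toNat := by omega
            exact ⟨p0, hs0, hp0, hr0.tail ⟨hb, Or.inr (Or.inl hbv)⟩⟩
          · exact hstk z (List.mem_cons_of_mem _ hm) b hzb hb
        · intro a b ha hstp
          rcases (hc'bit a).1 ha with hca | rfl
          · rcases hfront a b hca hstp with h | h
            · exact Or.inl ((hc'bit b).2 (Or.inl h))
            · rcases List.mem_cons.mp h with he | hm
              · refine Or.inl ((hc'bit b).2 (Or.inr ?_))
                omega
              · exact Or.inr (by simp only [List.mem_cons]; tauto)
          · rcases hstp.2 with h1 | h2 | h3 | h4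
            · refine Or.inr ?_
              simp only [List.mem_cons]
              exact Or.inr (Or.inr (Or.inl (by omega)))
            · refine Or.inr ?_
              simp only [List.mem_cons]
              exact Or.inr (Or.inr (Or.inr (Or.inl (by omega))))
            · refine Or.inr ?_
              simp only [List.mem_cons]
              exact Or.inl (by omega)
            · refine Or.inr ?_
              simp only [List.mem_cons]
              exact Or.inr (Or.inl (by omega))
        · intro p hp hpt
          rcases hseed p hp hpt with h | h
          · exact Or.inl ((hc'bit p).2 (Or.inl h))
          · rcases List.mem_cons.mp h with he | hm
            · exact Or.inl ((hc'bit p).2 (Or.inr (by omega)))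
            · exact Or.inr (by simp only [List.mem_cons]; tauto)
        · have hlt : c < c ||| 1 <<< x.toNat := by
            refine lt_of_le_of_ne (Nat.le_of_testBit fun i hi => (hc'bit i).2 (Or.inl hi)) ?_
            intro h
            have : (c ||| 1 <<< x.toNat).testBit x.toNat = true := (hc'bit _).2 (Or.inr rfl)
            rw [← h] at this
            rw [hcq] at this
            cases this
          have hle : c ||| 1 <<< x.toNat ≤ t := Nat.le_of_testBit hc'sub
          simp only [List.length_cons] at hfuel ⊢
          omega
      · rw [if_neg hC]
        push_neg at hC
        have hkey : ∀ b : Nat, (b : Int) = x → t.testBit b = true → c.testBit b = true := by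
          intro b hbx hbt
          have h0 : 0 ≤ x := by omega
          have hb' : x.toNat = b := by omega
          have := hC h0 (by rw [hb', and_one_testBit]; exact hbt)
          rw [hb', and_one_testBit] at this
          exact this
        apply ih rest c hsub hsound (fun z hz => hstk z (List.mem_cons_of_mem _ hz))
        · intro a b ha hstp
          rcases hfront a b ha hstp with h | h
          · exact Or.inl h
          · rcases List.mem_cons.mp h with he | hm
            · exact Or.inl (hkey b he hstp.1)
            · exact Or.inr hm
        · intro p hp hpt
          rcases hseed p hp hpt with h | h
          · exact Or.inl h
          · rcases List.mem_cons.mp h with he | hm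
            · exact Or.inl (hkey p he hpt)
            · exact Or.inr hm
        · simp only [List.length_cons] at hfuel
          omega

theorem componentN_correct (sN t k : Nat) :
    ∀ q, (componentN (sN : Int) t (k : Int)).testBit q = true ↔ GoodP sN t k q := by
  intro q
  have hstack : ((sN : Int) + 1) = ((sN + 1 : Nat) : Int) := by push_cast; ring
  refine dfsLoopN_correct t k sN (5 * t + 8) [(sN : Int) + 1, (sN : Int)] 0 ?_ ?_ ?_ ?_ ?_ ?_ q
  · intro j hj; simp at hj
  · intro j hj; simp at hj
  · intro z hz b hzb hb
    simp only [List.mem_cons, List.not_mem_nil, or_false] at hz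
    rcases hz with rfl | rfl
    · have : b = sN + 1 := by omega
      exact ⟨sN + 1, Or.inr rfl, this ▸ hb, this ▸ Relation.ReflTransGen.refl⟩
    · have : b = sN := by omega
      exact ⟨sN, Or.inl rfl, this ▸ hb, this ▸ Relation.ReflTransGen.refl⟩
  · intro a b ha; simp at ha
  · intro p hp hpt
    rcases hp with rfl | rfl
    · exact Or.inr (by simp)
    · exact Or.inr (by rw [← hstack]; simp)
  · simp only [List.length_cons, List.length_nil]
    omega

theorem innerEq (sN t k : Nat) : floodN (3 <<< sN) t k = componentN (sN : Int) t (k : Int) := by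
  refine Nat.eq_of_testBit_eq fun i => ?_
  have h1 := floodN_correct sN t k i
  have h2 := componentN_correct sN t k i
  by_cases h : GoodP sN t k i
  · rw [h1.2 h, h2.2 h]
  · rcases hb : (floodN (3 <<< sN) t k).testBit i with _ | _
    · rcases hc : (componentN (sN : Int) t (k : Int)).testBit i with _ | _
      · rfl
      · exact absurd (h2.1 hc) h
    · exact absurd (h1.1 hb) h

-- the two inner engines agree, at the Int level of the ports
theorem inner_lift (t : Nat) (sN kn : Nat) :
    flood ((3 : Int) <<< ((sN : Int)).toNat) (t : Int) ((kn : Nat) : Int) =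
      component ((sN : Nat) : Int) (t : Int) ((kn : Nat) : Int) := by
  have e3 : ((3 : Int) <<< ((sN : Int)).toNat) = (((3 <<< sN : Nat)) : Int) := by
    rw [Int.toNat_natCast]; exact_mod_cast rfl
  rw [e3, flood_cast, component_cast, Nat.cast_inj, Int.toNat_natCast]
  exact innerEq sN t kn

-- ---- outer-loop correspondence ----
theorem altLoop_zero (F : Nat) (s v : Int) (res : List Int) : altLoop F s 0 v res = res := by
  cases F <;> simp [altLoop]

theorem flood_zero (src v : Int) : flood src 0 v = 0 := by
  simp [flood]

theorem chainsRow_zero (y v : Int) : ∀ (xs : List Int) (res : List Int),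
    chainsRow xs y v 0 res = (0, res) := by
  intro xs
  induction xs with
  | nil => intro res; rfl
  | cons x rest ih => intro res; simp [chainsRow, flood_zero, ih]

theorem pyRange_two_nil {a b : Int} (h : b ≤ a) : PySem.List.pyRange a b 2 = [] := by
  rw [PySem.List.pyRange_of_pos a b (by norm_num)]
  rw [if_neg (by omega)]
  simp

theorem pyRange_two_cons {a b : Int} (h : a < b) :
    PySem.List.pyRange a b 2 = a :: PySem.List.pyRange (a + 2) b 2 := by
  rw [PySem.List.pyRange_of_pos a b (by norm_num), PySem.List.pyRange_of_pos (a+2) b (by norm_num)]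
  rw [if_pos h]
  have hn : ((b - a + 2 - 1) / 2).toNat =
      (if a + 2 < b then ((b - (a + 2) + 2 - 1) / 2).toNat else 0) + 1 := by
    split <;> omega
  rw [hn, List.range_succ_eq_map]
  simp only [List.map_cons, List.map_map]
  refine congrArg₂ _ (by ring) ?_
  exact List.map_congr_left (by intro k _; simp [Function.comp]; ring)

theorem altLoop_step_skip (f : Nat) (s b v : Int) (res : List Int) (hb : ¬ b = 0)
    (hcond : ¬ (PySem.Int.mod (PySem.Int.mod s v) 2 = 0 ∧ ¬ PySem.Int.mod s v = v - 1)) :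
    altLoop (f + 1) s b v res = altLoop f (s + 1) b v res := by
  simp only [altLoop, if_neg hb, if_neg hcond]

theorem altLoop_step_act (f : Nat) (s b v : Int) (res : List Int) (hb : ¬ b = 0)
    (hcond : PySem.Int.mod (PySem.Int.mod s v) 2 = 0 ∧ ¬ PySem.Int.mod s v = v - 1) :
    altLoop (f + 1) s b v res =
      (if component s b v ≠ 0 then
        altLoop f (s + 1) (PySem.Int.bxor b (component s b v)) v (res ++ [component s b v])
      else altLoop f (s + 1) b v res) := by
  simp only [altLoop, if_neg hb, if_pos hcond]

theorem mod_row (yn kn i : Nat) (hi : i < kn) :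
    PySem.Int.mod ((yn : Int) * (kn : Int) + (i : Int)) (kn : Int) = (i : Int) := by
  have hs : ((yn : Int) * (kn : Int) + (i : Int)) = ((yn * kn + i : Nat) : Int) := by push_cast; ring
  rw [hs, PySem.Int.mod_natCast, Nat.mul_comm yn kn, Nat.mul_add_mod, Nat.mod_eq_of_lt hi]

theorem mod_two_nat (i : Nat) : PySem.Int.mod ((i : Int)) 2 = ((i % 2 : Nat) : Int) := by
  rw [show (2 : Int) = ((2 : Nat) : Int) from rfl, PySem.Int.mod_natCast]

theorem rowLemma (kn yn : Nat) (hk : 2 ≤ kn) :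
    ∀ (cnt i bn : Nat) (res : List Int) (F : Nat), i + cnt = kn → i % 2 = 0 →
    altLoop (cnt + F) ((yn : Int) * (kn : Int) + (i : Int)) (bn : Int) (kn : Int) res =
      altLoop F (((yn : Int) + 1) * (kn : Int))
        (chainsRow (PySem.List.pyRange (i : Int) ((kn : Int) - 1) 2) (yn : Int) (kn : Int) (bn : Int) res).1
        (kn : Int)
        (chainsRow (PySem.List.pyRange (i : Int) ((kn : Int) - 1) 2) (yn : Int) (kn : Int) (bn : Int) res).2 := by
  intro cnt
  induction cnt using Nat.strong_induction_on with
  | _ cnt ih =>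
    intro i bn res F hik hev
    match cnt, hik with
    | 0, hik =>
      have hi : (i : Int) = (kn : Int) := by omega
      rw [pyRange_two_nil (by omega)]
      have harg : ((yn : Int) * (kn : Int) + (i : Int)) = ((yn : Int) + 1) * (kn : Int) := by
        rw [hi]; ring
      rw [Nat.zero_add, harg]
      rfl
    | c + 1, _ =>
      by_cases hbz : bn = 0
      · subst hbz
        rw [show ((0 : Nat) : Int) = (0 : Int) from rfl, chainsRow_zero]
        simp [altLoop_zero]
      · have hbz' : ¬ ((bn : Int) = 0) := by exact_mod_cast hbz
        have hilt : i < kn := by omega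
        have hmodr : PySem.Int.mod ((yn : Int) * (kn : Int) + (i : Int)) (kn : Int) = (i : Int) :=
          mod_row yn kn i hilt
        by_cases hedge : i = kn - 1
        · -- last (odd board width) column: B skips it, A's range is already empty
          have hc0 : c = 0 := by omega
          subst hc0
          have hcond : ¬ (PySem.Int.mod (PySem.Int.mod ((yn : Int) * (kn : Int) + (i : Int)) (kn : Int)) 2 = 0 ∧
              ¬ PySem.Int.mod ((yn : Int) * (kn : Int) + (i : Int)) (kn : Int) = (kn : Int) - 1) := by
            rw [hmodr]
            intro hcc
            exact hcc.2 (by omega)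
          rw [show (0 + 1 + F) = F + 1 from by omega, altLoop_step_skip F _ _ _ _ hbz' hcond]
          rw [pyRange_two_nil (by omega)]
          have harg : ((yn : Int) * (kn : Int) + (i : Int) + 1) = ((yn : Int) + 1) * (kn : Int) := by
            have : (i : Int) = (kn : Int) - 1 := by omega
            rw [this]; ring
          rw [harg]
          rfl
        · -- a scanned seed column: B acts, A consumes the head of its range
          have hilt2 : i < kn - 1 := by omega
          have hcge : 1 ≤ c := by omega
          have hcond : (PySem.Int.mod (PySem.Int.mod ((yn : Int) * (kn : Int) + (i : Int)) (kn : Int)) 2 = 0 ∧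
              ¬ PySem.Int.mod ((yn : Int) * (kn : Int) + (i : Int)) (kn : Int) = (kn : Int) - 1) := by
            rw [hmodr]
            constructor
            · rw [mod_two_nat, hev]; rfl
            · intro hcc; omega
          rw [show (c + 1 + F) = (c + F) + 1 from by omega,
            altLoop_step_act (c + F) _ _ _ _ hbz' hcond]
          -- identify the two chains
          have hseed : ((i : Int) + (yn : Int) * (kn : Int)) = (((yn * kn + i : Nat) : Nat) : Int) := by
            push_cast; ring
          have hsB : ((yn : Int) * (kn : Int) + (i : Int)) = (((yn * kn + i : Nat) : Nat) : Int) := by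
            push_cast; ring
          have hchain : flood ((3 : Int) <<< (((i : Int) + (yn : Int) * (kn : Int))).toNat) (bn : Int) (kn : Int) =
              component ((yn : Int) * (kn : Int) + (i : Int)) (bn : Int) (kn : Int) := by
            rw [hseed, hsB]
            exact inner_lift bn (yn * kn + i) kn
          rw [pyRange_two_cons (by omega)]
          -- unfold one chainsRow step
          show _ = altLoop F _ (chainsRow (_ :: _) _ _ _ _).1 _ (chainsRow (_ :: _) _ _ _ _).2
          rw [show ∀ rest, chainsRow ((i : Int) :: rest) (yn : Int) (kn : Int) (bn : Int) res =
              (if flood ((3 : Int) <<< (((i : Int) + (yn : Int) * (kn : Int))).toNat) (bn : Int) (kn : Int) ≠ 0 then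
                chainsRow rest (yn : Int) (kn : Int)
                  (PySem.Int.bxor (bn : Int) (flood ((3 : Int) <<< (((i : Int) + (yn : Int) * (kn : Int))).toNat) (bn : Int) (kn : Int))) (res ++ [flood ((3 : Int) <<< (((i : Int) + (yn : Int) * (kn : Int))).toNat) (bn : Int) (kn : Int)])
              else chainsRow rest (yn : Int) (kn : Int) (bn : Int) res) from fun rest => rfl]
          rw [hchain]
          -- chain as a Nat
          have hcomp : component ((yn : Int) * (kn : Int) + (i : Int)) (bn : Int) (kn : Int) =
              ((componentN (((yn * kn + i : Nat) : Nat) : Int) bn (kn : Int) : Nat) : Int) := by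
            rw [hsB, component_cast]
          set chainN := componentN (((yn * kn + i : Nat) : Nat) : Int) bn (kn : Int) with hchainN
          -- continue: both branches end in a skip step then the induction hypothesis
          have hcont : ∀ (bn' : Nat) (res' : List Int),
              altLoop (c + F) ((yn : Int) * (kn : Int) + (i : Int) + 1) (bn' : Int) (kn : Int) res' =
                altLoop F (((yn : Int) + 1) * (kn : Int))
                  (chainsRow (PySem.List.pyRange ((i : Int) + 2) ((kn : Int) - 1) 2) (yn : Int) (kn : Int) (bn' : Int) res').1
                  (kn : Int)
                  (chainsRow (PySem.List.pyRange ((i : Int) + 2) ((kn : Int) - 1) 2) (yn : Int) (kn : Int) (bn' : Int) res').2 := by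
            intro bn' res'
            by_cases hbz2 : bn' = 0
            · subst hbz2
              rw [show ((0 : Nat) : Int) = (0 : Int) from rfl, chainsRow_zero]
              simp [altLoop_zero]
            · have hbz2' : ¬ ((bn' : Int) = 0) := by exact_mod_cast hbz2
              have hs1 : ((yn : Int) * (kn : Int) + (i : Int) + 1) = ((yn : Int) * (kn : Int) + ((i + 1 : Nat) : Int)) := by
                push_cast; ring
              have hmod1 : PySem.Int.mod ((yn : Int) * (kn : Int) + ((i + 1 : Nat) : Int)) (kn : Int) = ((i + 1 : Nat) : Int) :=
                mod_row yn kn (i + 1) (by omega)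
              have hcond1 : ¬ (PySem.Int.mod (PySem.Int.mod ((yn : Int) * (kn : Int) + ((i + 1 : Nat) : Int)) (kn : Int)) 2 = 0 ∧
                  ¬ PySem.Int.mod ((yn : Int) * (kn : Int) + ((i + 1 : Nat) : Int)) (kn : Int) = (kn : Int) - 1) := by
                rw [hmod1, mod_two_nat]
                intro hcc
                have h1 : (i + 1) % 2 = 1 := by omega
                have := hcc.1
                rw [h1] at this
                exact absurd this (by norm_num)
              rw [hs1, show (c + F) = (c - 1 + F) + 1 from by omega,
                altLoop_step_skip _ _ _ _ _ hbz2' hcond1]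
              have hs2 : ((yn : Int) * (kn : Int) + ((i + 1 : Nat) : Int) + 1) = ((yn : Int) * (kn : Int) + ((i + 2 : Nat) : Int)) := by
                push_cast; ring
              have hr2 : ((i : Int) + 2) = ((i + 2 : Nat) : Int) := by push_cast; ring
              rw [hs2, hr2]
              exact ih (c - 1) (by omega) (i + 2) bn' res' F (by omega) (by omega)
          by_cases hcz : chainN = 0
          · rw [hcomp, hchainN] at *
            rw [if_neg (by rw [hcomp]; exact_mod_cast not_not.mpr hcz), if_neg (by rw [hcomp]; exact_mod_cast not_not.mpr hcz)]
            exact hcont bn res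
          · have hne : component ((yn : Int) * (kn : Int) + (i : Int)) (bn : Int) (kn : Int) ≠ 0 := by
              rw [hcomp]; exact_mod_cast hcz
            rw [if_pos hne, if_pos hne, hcomp]
            have hbx : PySem.Int.bxor ((bn : Nat) : Int) ((chainN : Nat) : Int) = (((bn ^^^ chainN : Nat) : Nat) : Int) :=
              PySem.Int.bxor_natCast bn chainN
            rw [hbx]
            exact hcont (bn ^^^ chainN) (res ++ [((chainN : Nat) : Int)])

theorem chainsRow_cast (kn : Nat) : ∀ (xs : List Int) (y : Int) (bn : Nat) (res : List Int),
    ∃ bn' : Nat, (chainsRow xs y (kn : Int) (bn : Int) res).1 = (bn' : Int) := by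
  intro xs
  induction xs with
  | nil => intro y bn res; exact ⟨bn, rfl⟩
  | cons x rest ih =>
    intro y bn res
    obtain ⟨c, hc⟩ : ∃ c : Nat,
        flood ((3 : Int) <<< (x + y * (kn : Int)).toNat) (bn : Int) (kn : Int) = (c : Int) := by
      rw [show ((3 : Int) <<< (x + y * (kn : Int)).toNat) =
        (((3 <<< (x + y * (kn : Int)).toNat : Nat)) : Int) from by exact_mod_cast rfl, flood_cast]
      exact ⟨_, rfl⟩
    simp only [chainsRow]
    rw [hc]
    split
    · rw [show PySem.Int.bxor ((bn : Nat) : Int) ((c : Nat) : Int) = ((bn ^^^ c : Nat) : Int) from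
        PySem.Int.bxor_natCast bn c]
      exact ih y (bn ^^^ c) (res ++ [((c : Nat) : Int)])
    · exact ih y bn res

theorem mainLemma (kn : Nat) (hk : 2 ≤ kn) :
    ∀ (f : Nat) (bn yn : Nat) (res : List Int),
      chainsLoop f (bn : Int) (kn : Int) ((yn : Nat) : Int) res =
        altLoop (kn * f) ((yn : Int) * (kn : Int)) (bn : Int) (kn : Int) res := by
  intro f
  induction f with
  | zero => intro bn yn res; rw [Nat.mul_zero]; rfl
  | succ f ih =>
    intro bn yn res
    by_cases hbz : bn = 0
    · subst hbz
      rw [show ((0 : Nat) : Int) = (0 : Int) from rfl, altLoop_zero]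
      rfl
    · have hbz' : ¬ ((bn : Int) = 0) := by exact_mod_cast hbz
      have hrow := rowLemma kn yn hk kn 0 bn res (kn * f) (by omega) (by omega)
      rw [show ((0 : Nat) : Int) = (0 : Int) from rfl] at hrow
      rw [show kn * (f + 1) = kn + kn * f from by ring,
        show ((yn : Int) * (kn : Int)) = ((yn : Int) * (kn : Int) + (0 : Int)) from by ring,
        hrow]
      rw [show chainsLoop (f + 1) ((bn : Nat) : Int) (kn : Int) (yn : Int) res =
        chainsLoop f (chainsRow (PySem.List.pyRange 0 ((kn : Int) - 1) 2) (yn : Int) (kn : Int) ((bn : Nat) : Int) res).1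
          (kn : Int) ((yn : Int) + 1)
          (chainsRow (PySem.List.pyRange 0 ((kn : Int) - 1) 2) (yn : Int) (kn : Int) ((bn : Nat) : Int) res).2 from by
        simp only [chainsLoop, if_neg hbz']]
      obtain ⟨bn', hbn'⟩ := chainsRow_cast kn (PySem.List.pyRange 0 ((kn : Int) - 1) 2) (yn : Int) bn res
      rw [hbn']
      have hy : ((yn : Int) + 1) = (((yn + 1 : Nat) : Nat) : Int) := by push_cast; ring
      rw [hy]
      exact ih bn' (yn + 1) _

-- ===== VERDICT (by name: the statement is the Claim_ definition above) =====
theorem chains_spec : Claim_equal_chains := by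
  intro b v hdom hpre
  unfold Spec_chains
  obtain ⟨hb0, hrest⟩ := hpre
  rcases hrest with rfl | ⟨hv2, _⟩
  · rw [chains, chains_alt, altLoop_zero]
    rfl
  · obtain ⟨bn, rfl⟩ := Int.eq_ofNat_of_zero_le hb0
    have hv0 : 0 ≤ v := by omega
    obtain ⟨kn, rfl⟩ := Int.eq_ofNat_of_zero_le hv0
    have hk2 : 2 ≤ kn := by exact_mod_cast hv2
    rw [chains, chains_alt, Int.natAbs_natCast, Int.toNat_natCast]
    have h := mainLemma kn hk2 (bn + 2) bn 0 []
    simp only [Nat.cast_zero, zero_mul] at h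
    exact h
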